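-- pv_equiv track=rewrite | github.com/kgdunn/process-improve | process_improve/experiments/evaluate.py | _parse_word
-- ===== SOURCE A (Python) =====
-- def _parse_word(word: str, factor_names: list[str]) -> frozenset[int]:
--     """Parse a word like ``"ABCE"`` into a frozenset of factor indices.
--
--     Also handles ``"I=ABCE"`` format (strips the ``I=`` prefix).
--     """
--     word = word.strip().removeprefix("I=")
--     if word == "I":
--         return frozenset()
--
--     # Try multi-char factor names first (when names are longer than 1 char)
--     name_to_idx = {name: i for i, name in enumerate(factor_names)}
--
--     # If all factor names are single chars, parse character-by-character
--     if all(len(n) == 1 for n in factor_names):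
--         indices = set()
--         for ch in word:
--             if ch in name_to_idx:
--                 indices.add(name_to_idx[ch])
--         return frozenset(indices)
--
--     # Multi-char names: try to match greedily (longest first)
--     remaining = word
--     indices = set()
--     sorted_names = sorted(name_to_idx.keys(), key=len, reverse=True)
--     while remaining:
--         matched = False
--         for name in sorted_names:
--             if remaining.startswith(name):
--                 indices.add(name_to_idx[name])
--                 remaining = remaining[len(name) :]
--                 matched = True
--                 break
--         if not matched:
--             remaining = remaining[1:]  # skip unrecognized character
--     return frozenset(indices)
-- ===== SOURCE B (Python) =====
-- def _parse_word(word: str, factor_names: list[str]) -> frozenset[int]: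
--     """Parse a word like ``"ABCE"`` into a frozenset of factor indices.
--
--     Uniform longest-match scan: no single-char/multi-char branch and no sort —
--     at each position take the longest factor name that matches (last index wins
--     for duplicate names), otherwise skip one character.
--     """
--     word = word.strip().removeprefix("I=")
--     if word == "I":
--         return frozenset()
--
--     last = {}
--     for i, name in enumerate(factor_names):
--         last[name] = i
--
--     out = set()
--     remaining = word
--     while remaining:
--         best, best_idx = 0, 0
--         for name, idx in last.items():
--             if len(name) > best and remaining.startswith(name):
--                 best, best_idx = len(name), idx
--         if best:
--             out.add(best_idx)
--             remaining = remaining[best:]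
--         else:
--             remaining = remaining[1:]
--     return frozenset(out)
-- ===== Notes on version B (the rewrite author's own statement) =====
-- stated objective: simpler
-- what changed: Replaces A's two-branch parser (per-character membership when all names are single characters, otherwise sort-names-by-length-descending plus first-match greedy loop) by one uniform scan that at each position takes the longest matching factor name and advances by its length, with no sort and no branch split.
-- outside the precondition, e.g. on _parse_word('A', ['']): A does not finish within the time limit, B returns set(); on _parse_word('AB', ['AB', '']): A returns {0}, B returns {0}
import Mathlib
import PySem

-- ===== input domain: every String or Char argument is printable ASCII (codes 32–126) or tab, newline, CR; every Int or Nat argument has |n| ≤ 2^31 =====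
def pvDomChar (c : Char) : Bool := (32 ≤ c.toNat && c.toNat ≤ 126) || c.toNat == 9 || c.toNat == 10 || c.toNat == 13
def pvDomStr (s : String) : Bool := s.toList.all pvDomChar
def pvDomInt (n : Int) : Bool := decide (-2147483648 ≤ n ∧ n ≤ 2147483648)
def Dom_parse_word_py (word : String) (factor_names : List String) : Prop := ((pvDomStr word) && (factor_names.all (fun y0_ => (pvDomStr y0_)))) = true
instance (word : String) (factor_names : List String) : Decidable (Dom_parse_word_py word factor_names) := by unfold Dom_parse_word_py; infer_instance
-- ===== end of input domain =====

-- B replaces A's two-branch parser (single-char membership / sorted greedy first-match) by one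
-- uniform longest-match scan; objective: simpler (no sort, no branch split), not claimed faster.

-- ===== PORT A =====
-- word.strip().removeprefix("I=")  — removeprefix ported by hand (exact: drop the prefix iff present); shared by both Pythons
def pvPreprocess (word : String) : List Char :=
  let s := PySem.Chars.strip word.toList
  if PySem.Chars.startswith s ['I', '='] then s.drop 2 else s

-- name_to_idx = {name: i for i, name in enumerate(factor_names)}  (keys as List Char; duplicates keep the last index); identical in both Pythons
def pvNameToIdx (factor_names : List String) : PySem.Dict (List Char) Int :=
  (PySem.List.enumerate factor_names).foldl (fun d p => d.insert p.2.toList p.1) PySem.Dict.empty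

-- the greedy while-loop of A's multi-char branch
def pvALoop (sorted_names : List (List Char)) (d : PySem.Dict (List Char) Int) :
    List Char → PySem.Set Int → PySem.Set Int
  | [], inds => inds
  | c :: rest, inds =>
    match sorted_names.find? (fun n => PySem.Chars.startswith (c :: rest) n) with
    | some name =>
      if _hn : name.length = 0 then inds  -- the Python loops forever here (empty factor name); outside Pre_
      else pvALoop sorted_names d ((c :: rest).drop name.length) (PySem.Set.add inds (d.getD name 0))
    | none => pvALoop sorted_names d rest inds
termination_by r _ => r.length
decreasing_by
  · simp only [List.length_drop, List.length_cons]; omega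
  · simp

def parse_word_py (word : String) (factor_names : List String) : List Int :=
  let w := pvPreprocess word
  if w = ['I'] then []
  else
    let d := pvNameToIdx factor_names
    if factor_names.all (fun n => PySem.Str.len n == 1) then
      w.foldl (fun inds ch =>
        if d.contains [ch] then PySem.Set.add inds (d.getD [ch] 0) else inds) PySem.Set.empty
    else
      pvALoop (PySem.List.sorted d.keys (fun n => n.length) true) d w PySem.Set.empty

-- ===== PORT B =====
-- inner for-loop of B: best, best_idx over last.items()
def pvBestMatch (items : List (List Char × Int)) (r : List Char) : Nat × Int :=
  items.foldl (fun b p =>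
    if p.1.length > b.1 && PySem.Chars.startswith r p.1 then (p.1.length, p.2) else b) (0, 0)

-- the uniform while-loop of B
def pvBLoop (items : List (List Char × Int)) : List Char → PySem.Set Int → PySem.Set Int
  | [], out => out
  | c :: rest, out =>
    if _hb : 0 < (pvBestMatch items (c :: rest)).1 then
      pvBLoop items ((c :: rest).drop (pvBestMatch items (c :: rest)).1)
        (PySem.Set.add out (pvBestMatch items (c :: rest)).2)
    else pvBLoop items rest out
termination_by r _ => r.length
decreasing_by
  · simp only [List.length_drop, List.length_cons]; omega
  · simp

def parse_word_py_alt (word : String) (factor_names : List String) : List Int :=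
  let w := pvPreprocess word
  if w = ['I'] then []
  else pvBLoop (pvNameToIdx factor_names).items w PySem.Set.empty

-- ===== PRECONDITION & SPEC =====
-- Pre_ excludes factor-name lists containing the empty string: an empty name matches without
-- consuming input, so A's greedy multi-char loop diverges on e.g. ('A', ['']) (and where A does
-- still return, as on ('AB', ['AB','']), the exclusion is only a narrowing of this one reason).
def Pre_parse_word_py (word : String) (factor_names : List String) : Prop := "" ∉ factor_names
instance (word : String) (factor_names : List String) : Decidable (Pre_parse_word_py word factor_names) := by unfold Pre_parse_word_py; infer_instance

def pvWitness_parse_word_py : String × List String := ("I=AbBc", ["A", "bB", "c"])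

def Spec_parse_word_py (word : String) (factor_names : List String) (out : List Int) : Prop := out = parse_word_py_alt word factor_names
instance (word : String) (factor_names : List String) (out : List Int) : Decidable (Spec_parse_word_py word factor_names out) := by unfold Spec_parse_word_py; infer_instance

-- ===== CLAIM (what is proved, stated in full; the proofs are below) =====
def Claim_equal_parse_word_py : Prop := ∀ (word : String) (factor_names : List String), Dom_parse_word_py word factor_names → Pre_parse_word_py word factor_names → Spec_parse_word_py word factor_names (parse_word_py word factor_names)

-- ===== LEMMAS AND PROOFS =====

-- two prefixes of the same string with equal length are equal
lemma pvPrefix_eq {p q r : List Char} (hp : p <+: r) (hq : q <+: r) (hl : p.length = q.length) : p = q :=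
  List.IsPrefix.eq_of_length (List.prefix_of_prefix_length_le hp hq (le_of_eq hl)) hl

-- B's inner fold never moves once no remaining item beats the accumulator
lemma pvBestMatch_stop (r : List Char) :
    ∀ (items : List (List Char × Int)) (b : Nat × Int),
    (∀ p ∈ items, p.1 <+: r → p.1.length ≤ b.1) →
    items.foldl (fun b p =>
      if p.1.length > b.1 && PySem.Chars.startswith r p.1 then (p.1.length, p.2) else b) b = b := by
  intro items
  induction items with
  | nil => intro b _; rfl
  | cons q rest ih =>
    intro b hb
    have hq : (if q.1.length > b.1 && PySem.Chars.startswith r q.1 then (q.1.length, q.2) else b) = b := by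
      by_cases hpre : q.1 <+: r
      · have h1 := hb q (by simp) hpre
        have h2 : ¬ (q.1.length > b.1) := by omega
        simp [h2]
      · have h3 : PySem.Chars.startswith r q.1 = false := by
          rw [Bool.eq_false_iff]
          intro hc
          exact hpre ((PySem.Chars.startswith_iff r q.1).mp hc)
        simp [h3]
    simp only [List.foldl_cons, hq]
    exact ih b (fun p hp => hb p (by simp [hp]))

-- B's inner fold finds the unique longest matching key
lemma pvBestMatch_found (r : List Char) (name : List Char) (idx : Int) :
    ∀ (items : List (List Char × Int)) (b : Nat × Int),
    (name, idx) ∈ items →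
    name <+: r →
    (∀ p ∈ items, p.1 <+: r → p.1 ≠ name → p.1.length < name.length) →
    (∀ p ∈ items, p.1 = name → p.2 = idx) →
    b.1 < name.length →
    items.foldl (fun b p =>
      if p.1.length > b.1 && PySem.Chars.startswith r p.1 then (p.1.length, p.2) else b) b
      = (name.length, idx) := by
  intro items
  induction items with
  | nil => intro b hmem; simp at hmem
  | cons q rest ih =>
    intro b hmem hpre hmax huni hb
    by_cases hq : q.1 = name
    · have hq2 : q.2 = idx := huni q (by simp) hq
      have hstep : (if q.1.length > b.1 && PySem.Chars.startswith r q.1 then (q.1.length, q.2) else b)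
          = (name.length, idx) := by
        have hsw : PySem.Chars.startswith r q.1 = true := by
          rw [hq]; exact (PySem.Chars.startswith_iff r name).mpr hpre
        have hgt : q.1.length > b.1 := by rw [hq]; omega
        have hcond : (decide (name.length > b.1) && PySem.Chars.startswith r name) = true := by
          rw [← hq]; simp [hsw, hgt]
        rw [hq, hq2, if_pos hcond]
      simp only [List.foldl_cons, hstep]
      apply pvBestMatch_stop
      intro p hp hpp
      by_cases hpn : p.1 = name
      · simp [hpn]
      · exact le_of_lt (hmax p (by simp [hp]) hpp hpn)
    · have hmem' : (name, idx) ∈ rest := by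
        rcases List.mem_cons.mp hmem with h | h
        · exact absurd (congrArg Prod.fst h.symm) hq
        · exact h
      have hmax' : ∀ p ∈ rest, p.1 <+: r → p.1 ≠ name → p.1.length < name.length :=
        fun p hp => hmax p (by simp [hp])
      have huni' : ∀ p ∈ rest, p.1 = name → p.2 = idx := fun p hp => huni p (by simp [hp])
      by_cases hcond : (q.1.length > b.1 && PySem.Chars.startswith r q.1) = true
      · have hq1 : q.1 <+: r := by
          have := (Bool.and_eq_true _ _).mp hcond
          exact (PySem.Chars.startswith_iff r q.1).mp this.2
        have hlt : q.1.length < name.length := hmax q (by simp) hq1 hq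
        simp only [List.foldl_cons, hcond, if_true]
        exact ih (q.1.length, q.2) hmem' hpre hmax' huni' hlt
      · simp only [List.foldl_cons, hcond]
        exact ih b hmem' hpre hmax' huni' hb

-- what A's find? over the length-descending sorted keys returns
lemma pvFind_some {keys : List (List Char)} {r name : List Char}
    (hs : (PySem.List.sorted keys (fun n => n.length) true).find?
      (fun n => PySem.Chars.startswith r n) = some name) :
    name ∈ keys ∧ name <+: r ∧ ∀ k ∈ keys, k <+: r → k ≠ name → k.length < name.length := by
  obtain ⟨hpn, as, bs, hsplit, hbefore⟩ := List.find?_eq_some_iff_append.mp hs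
  have hmem : name ∈ keys := by
    rw [← PySem.List.mem_sorted keys (fun n => n.length) true name, hsplit]
    simp
  have hpre : name <+: r := (PySem.Chars.startswith_iff r name).mp hpn
  refine ⟨hmem, hpre, ?_⟩
  intro k hk hkp hkn
  have hk' : k ∈ as ++ name :: bs := by
    rw [← hsplit]
    exact (PySem.List.mem_sorted keys (fun n => n.length) true k).mpr hk
  rcases List.mem_append.mp hk' with h | h
  · exfalso
    have hb := hbefore k h
    simp only [Bool.not_eq_eq_eq_not, Bool.not_true] at hb
    rw [(PySem.Chars.startswith_iff r k).mpr hkp] at hb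
    exact Bool.true_eq_false.mp hb
  · rcases List.mem_cons.mp h with h | h
    · exact absurd h hkn
    · have hp := PySem.List.sorted_pairwise_rev keys (fun n => n.length)
      rw [hsplit] at hp
      have hpc : (name :: bs).Pairwise (fun a b => b.length ≤ a.length) :=
        (List.pairwise_append.mp hp).2.1
      have hle : k.length ≤ name.length := (List.pairwise_cons.mp hpc).1 k h
      rcases lt_or_eq_of_le hle with hlt | heq
      · exact hlt
      · exact absurd (pvPrefix_eq hkp hpre heq) hkn

lemma pvFind_none {keys : List (List Char)} {r : List Char}
    (hs : (PySem.List.sorted keys (fun n => n.length) true).find?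
      (fun n => PySem.Chars.startswith r n) = none) :
    ∀ k ∈ keys, ¬ k <+: r := by
  intro k hk hkp
  have h := List.find?_eq_none.mp hs k
    ((PySem.List.mem_sorted keys (fun n => n.length) true k).mpr hk)
  rw [(PySem.Chars.startswith_iff r k).mpr hkp] at h
  exact h rfl

-- the name→index dict: unique keys, keys come from factor_names
lemma pvDict_nodup (fs : List String) : (pvNameToIdx fs).keys.Nodup :=
  PySem.Dict.nodup_keys_foldl_insert_key (PySem.List.enumerate fs)
    (fun p => p.2.toList) (fun _ p => p.1) PySem.Dict.empty PySem.Dict.nodup_keys_empty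

lemma pvEnum_snd : ∀ (xs : List String) (s : Int), (PySem.List.enumerate xs s).map Prod.snd = xs := by
  intro xs
  induction xs with
  | nil => intro s; rfl
  | cons x t ih => intro s; simp [PySem.List.enumerate, ih]

lemma pvDict_keys_sub (fs : List String) :
    ∀ k ∈ (pvNameToIdx fs).keys, ∃ f ∈ fs, k = f.toList := by
  intro k hk
  have h := PySem.Dict.keys_foldl_insert_key (ν := Int) (PySem.List.enumerate fs)
    (fun p => p.2.toList) (fun _ p => p.1) PySem.Dict.empty
  rw [pvNameToIdx] at hk
  rw [h] at hk
  rw [PySem.Dict.keys_empty, PySem.Set.update_nil_left] at hk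
  rw [PySem.Set.mem_ofList] at hk
  obtain ⟨p, hp, hpk⟩ := List.mem_map.mp hk
  exact ⟨p.2, by rw [← pvEnum_snd fs 0]; exact List.mem_map_of_mem hp, hpk.symm⟩

-- looking a key up: its (key, value) item and value uniqueness
lemma pvDict_lookup {d : PySem.Dict (List Char) Int} {k : List Char}
    (hnd : d.keys.Nodup) (hk : k ∈ d.keys) :
    (k, d.getD k 0) ∈ d.items ∧ ∀ p ∈ d.items, p.1 = k → p.2 = d.getD k 0 := by
  have hc : d.contains k = true := (PySem.Dict.contains_iff_mem_keys d k).mpr hk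
  have hsome : (d.get? k).isSome := by rw [← PySem.Dict.contains_eq_isSome_get?]; exact hc
  obtain ⟨v, hv⟩ := Option.isSome_iff_exists.mp hsome
  have hg : d.getD k 0 = v := PySem.Dict.getD_of_get?_eq_some d 0 hv
  constructor
  · rw [hg]; exact PySem.Dict.mem_items_of_get?_eq_some d hv
  · intro p hp hpk
    have hp' : (k, p.2) ∈ d.items := by rw [← hpk]; exact hp
    have := PySem.Dict.get?_of_mem_items d hp' hnd
    rw [hv] at this
    rw [hg]
    exact (Option.some_inj.mp this).symm

-- A's greedy sorted loop equals B's longest-match scan (multi-char branch)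
lemma pvLoop_eq (d : PySem.Dict (List Char) Int) (hnd : d.keys.Nodup)
    (hne : ∀ k ∈ d.keys, k ≠ []) :
    ∀ (n : Nat) (r : List Char) (inds : PySem.Set Int), r.length ≤ n →
    pvALoop (PySem.List.sorted d.keys (fun n => n.length) true) d r inds = pvBLoop d.items r inds := by
  intro n
  induction n with
  | zero =>
    intro r inds hr
    have : r = [] := List.eq_nil_of_length_eq_zero (by omega)
    subst this
    rw [pvALoop, pvBLoop]
  | succ n ih =>
    intro r inds hr
    cases r with
    | nil => rw [pvALoop, pvBLoop]
    | cons c rest =>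
      rw [pvALoop, pvBLoop]
      cases hfind : (PySem.List.sorted d.keys (fun n => n.length) true).find?
          (fun n => PySem.Chars.startswith (c :: rest) n) with
      | none =>
        have hnp := pvFind_none hfind
        have hstop : pvBestMatch d.items (c :: rest) = (0, 0) := by
          unfold pvBestMatch
          apply pvBestMatch_stop
          intro p hp hpp
          exact absurd hpp (hnp p.1 (PySem.Dict.mem_keys_of_mem_items d hp))
        simp only [hstop]
        exact ih rest inds (by simp at hr; omega)
      | some name =>
        obtain ⟨hmemk, hpre, hmax⟩ := pvFind_some hfind
        have hne' : name ≠ [] := hne name hmemk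
        have hlen : 0 < name.length := List.length_pos_iff.mpr hne'
        obtain ⟨hmem, huni⟩ := pvDict_lookup hnd hmemk
        have hbm : pvBestMatch d.items (c :: rest) = (name.length, d.getD name 0) := by
          unfold pvBestMatch
          exact pvBestMatch_found (c :: rest) name (d.getD name 0) d.items (0, 0) hmem hpre
            (fun p hp => hmax p.1 (PySem.Dict.mem_keys_of_mem_items d hp)) huni hlen
        simp only [hbm]
        rw [dif_neg (by omega), dif_pos (by omega : (0:Nat) < name.length)]
        exact ih _ _ (by simp only [List.length_drop, List.length_cons] at *; omega)

-- A's per-character membership loop equals B's scan when every key is one character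
lemma pvChar_eq (d : PySem.Dict (List Char) Int) (hnd : d.keys.Nodup)
    (h1 : ∀ k ∈ d.keys, k.length = 1) :
    ∀ (r : List Char) (inds : PySem.Set Int),
    r.foldl (fun inds ch =>
      if d.contains [ch] then PySem.Set.add inds (d.getD [ch] 0) else inds) inds
      = pvBLoop d.items r inds := by
  intro r
  induction r with
  | nil =>
    intro inds
    rw [pvBLoop]
    rfl
  | cons c rest ih =>
    intro inds
    rw [pvBLoop]
    have hcpre : [c] <+: c :: rest := ⟨rest, rfl⟩
    by_cases hc : d.contains [c] = true
    · have hmemk : [c] ∈ d.keys := (PySem.Dict.contains_iff_mem_keys d [c]).mp hc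
      obtain ⟨hmem, huni⟩ := pvDict_lookup hnd hmemk
      have hbm : pvBestMatch d.items (c :: rest) = (1, d.getD [c] 0) := by
        unfold pvBestMatch
        have hmax : ∀ p ∈ d.items, p.1 <+: c :: rest → p.1 ≠ [c] → p.1.length < [c].length := by
          intro p hp hpp hpn
          exfalso
          have hk := PySem.Dict.mem_keys_of_mem_items d hp
          have hl := h1 _ hk
          exact hpn (pvPrefix_eq hpp hcpre (by simp [hl]))
        have := pvBestMatch_found (c :: rest) [c] (d.getD [c] 0) d.items (0, 0) hmem hcpre hmax huni (by simp)
        simpa using this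
      rw [List.foldl_cons]
      simp only [hc, if_true, hbm]
      rw [dif_pos (by omega : (0:Nat) < 1)]
      exact ih _
    · have hstop : pvBestMatch d.items (c :: rest) = (0, 0) := by
        unfold pvBestMatch
        apply pvBestMatch_stop
        intro p hp hpp
        exfalso
        have hk := PySem.Dict.mem_keys_of_mem_items d hp
        have hl := h1 _ hk
        have hpc : p.1 = [c] := pvPrefix_eq hpp hcpre (by simp [hl])
        rw [hpc] at hk
        exact hc ((PySem.Dict.contains_iff_mem_keys d [c]).mpr hk)
      rw [List.foldl_cons]
      simp only [hc, hstop]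
      rw [dif_neg (by omega)]
      exact ih inds

-- ===== VERDICT (by name: the statement is the Claim_ definition above) =====
theorem parse_word_py_spec : Claim_equal_parse_word_py := by
  unfold Claim_equal_parse_word_py
  intro word fs _hdom hpre
  unfold Spec_parse_word_py parse_word_py parse_word_py_alt
  dsimp only
  by_cases hI : pvPreprocess word = ['I']
  · simp [hI]
  · simp only [hI, if_false]
    have hnd : (pvNameToIdx fs).keys.Nodup := pvDict_nodup fs
    have hsub := pvDict_keys_sub fs
    by_cases hall : fs.all (fun n => PySem.Str.len n == 1) = true
    · simp only [hall, if_true]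
      have h1 : ∀ k ∈ (pvNameToIdx fs).keys, k.length = 1 := by
        intro k hk
        obtain ⟨f, hf, rfl⟩ := hsub k hk
        have hb := List.all_eq_true.mp hall f hf
        have hlen : PySem.Str.len f = 1 := by simpa using hb
        rw [PySem.Str.len_eq] at hlen
        exact_mod_cast hlen
      exact pvChar_eq (pvNameToIdx fs) hnd h1 (pvPreprocess word) PySem.Set.empty
    · simp only [hall]
      have hne : ∀ k ∈ (pvNameToIdx fs).keys, k ≠ [] := by
        intro k hk
        obtain ⟨f, hf, rfl⟩ := hsub k hk
        intro hnil
        exact hpre (by rwa [String.toList_eq_nil_iff.mp hnil] at hf)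
      exact pvLoop_eq (pvNameToIdx fs) hnd hne (pvPreprocess word).length
        (pvPreprocess word) PySem.Set.empty le_rfl
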